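-- pv_equiv track=rewrite | github.com/Branimir96/ai-novine-fastapi | app/services/news_service.py | parse_news_content
-- ===== SOURCE A (Python) =====
-- def parse_news_content(content):
--     """Parse news file content into individual articles for FastAPI"""
--     articles = []
--     lines = content.split('\n')
--     current_article = {}
--
--     i = 0
--     while i < len(lines):
--         line = lines[i].strip()
--
--         if line.startswith('NASLOV:'):
--             if current_article:
--                 articles.append(current_article)
--
--             current_article = {
--                 'naslov': line.replace('NASLOV:', '').strip(),
--                 'tekst': '',
--                 'ai_enhanced_content': '',
--                 'izvor': '',
--                 'original_link': '',  # Changed from 'link' to 'original_link'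
--                 'link': None  # This will be None for all categories now
--             }
--             i += 1
--
--             article_text = []
--             ai_content = []
--             in_ai_section = False
--
--             while i < len(lines) and not lines[i].strip().startswith('Izvor:'):
--                 line_content = lines[i].strip()
--                 if line_content:
--                     if line_content.startswith('AI_ENHANCED:'):
--                         in_ai_section = True
--                         ai_content.append(line_content.replace('AI_ENHANCED:', '').strip())
--                     elif in_ai_section:
--                         ai_content.append(line_content)
--                     else:
--                         article_text.append(line_content)
--                 i += 1
--
--             current_article['tekst'] = ' '.join(article_text)
--             current_article['ai_enhanced_content'] = ' '.join(ai_content)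
--
--             # Get source info
--             if i < len(lines) and lines[i].strip().startswith('Izvor:'):
--                 source_line = lines[i].strip().replace('Izvor:', '').strip()
--                 if ' - ' in source_line:
--                     source_parts = source_line.split(' - ', 1)
--                     current_article['izvor'] = source_parts[0].strip()
--                     current_article['original_link'] = source_parts[1].strip()
--                 else:
--                     current_article['izvor'] = source_line
--                     current_article['original_link'] = None
--             i += 1
--         else:
--             i += 1
--
--     if current_article:
--         articles.append(current_article)
--
--     return articles
-- ===== SOURCE B (Python) =====
-- def _build_article(header, body, source_line):
--     tekst, ai, in_ai = [], [], False
--     for line in body: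
--         if not line:
--             continue
--         if line.startswith('AI_ENHANCED:'):
--             in_ai = True
--             ai.append(line.replace('AI_ENHANCED:', '').strip())
--         elif in_ai:
--             ai.append(line)
--         else:
--             tekst.append(line)
--     izvor, link = '', ''
--     if source_line is not None:
--         s = source_line.replace('Izvor:', '').strip()
--         if ' - ' in s:
--             left, right = s.split(' - ', 1)
--             izvor, link = left.strip(), right.strip()
--         else:
--             izvor, link = s, None
--     return {
--         'naslov': header.replace('NASLOV:', '').strip(),
--         'tekst': ' '.join(tekst),
--         'ai_enhanced_content': ' '.join(ai),
--         'izvor': izvor,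
--         'original_link': link,
--         'link': None,
--     }
--
-- def parse_news_content(content):
--     # pass 1: group the stripped lines into blocks (header, body lines, source line or None)
--     blocks = []
--     current = None
--     for line in (raw.strip() for raw in content.split('\n')):
--         if current is None:
--             if line.startswith('NASLOV:'):
--                 current = (line, [])
--         elif line.startswith('Izvor:'):
--             blocks.append((current[0], current[1], line))
--             current = None
--         else:
--             current = (current[0], current[1] + [line])
--     if current is not None:
--         blocks.append((current[0], current[1], None))
--     # pass 2: parse each block into an article dict
--     return [_build_article(h, body, src) for (h, body, src) in blocks]
-- ===== Notes on version B (the rewrite author's own statement) =====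
-- stated objective: simpler
-- what changed: Replaces A's index-driven while loop (with a nested inner while that scans ahead to the Izvor: line and mutates a current dict) by two passes: one state fold that groups the stripped lines into (header, body, source) blocks, then a map that builds each article dict from its block.
import Mathlib
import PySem

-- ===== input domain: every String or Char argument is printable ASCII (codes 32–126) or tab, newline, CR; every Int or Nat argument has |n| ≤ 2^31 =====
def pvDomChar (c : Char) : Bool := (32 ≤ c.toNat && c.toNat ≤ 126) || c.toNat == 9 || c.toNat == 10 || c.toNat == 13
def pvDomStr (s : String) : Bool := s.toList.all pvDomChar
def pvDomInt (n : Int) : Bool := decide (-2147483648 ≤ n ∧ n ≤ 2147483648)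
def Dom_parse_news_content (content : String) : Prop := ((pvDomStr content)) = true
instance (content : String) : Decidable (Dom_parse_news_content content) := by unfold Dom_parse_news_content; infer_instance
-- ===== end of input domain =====

-- B replaces A's index-driven while loop with nested Izvor-scanning by two passes: a single
-- state fold grouping stripped lines into blocks, then a map building each article (objective: simpler).

-- ===== PORT A =====
-- inner while loop: collect article_text / ai_content until a line strip-starts with 'Izvor:'; returns (article_text, ai_content, remaining raw lines)
def pvInnerA : List String → List String → List String → Bool → (List String × List String × List String)
  | [], t, ai, _ => (t, ai, [])
  | l :: rest, t, ai, inAi =>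
    if PySem.Str.startswith (PySem.Str.strip l) "Izvor:" then (t, ai, l :: rest)
    else
      let lc := PySem.Str.strip l
      if lc ≠ "" then
        if PySem.Str.startswith lc "AI_ENHANCED:" then
          pvInnerA rest t (ai ++ [PySem.Str.strip (PySem.Str.replace lc "AI_ENHANCED:" "")]) true
        else if inAi then pvInnerA rest t (ai ++ [lc]) inAi
        else pvInnerA rest (t ++ [lc]) ai inAi
      else pvInnerA rest t ai inAi

theorem pvInnerA_len : ∀ (ls t ai : List String) (b : Bool), (pvInnerA ls t ai b).2.2.length ≤ ls.length := by
  intro ls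
  induction ls with
  | nil => intro t ai b; simp [pvInnerA]
  | cons l rest ih =>
    intro t ai b
    simp only [pvInnerA]
    split
    · simp
    · split
      · split
        · exact le_trans (ih _ _ _) (by simp)
        · split
          · exact le_trans (ih _ _ _) (by simp)
          · exact le_trans (ih _ _ _) (by simp)
      · exact le_trans (ih _ _ _) (by simp)

-- source-info block of A: mutates izvor / original_link in the current dict
def pvSourceA (d : PySem.Dict String (Option String)) (izRaw : String) : PySem.Dict String (Option String) :=
  let source_line := PySem.Str.strip (PySem.Str.replace (PySem.Str.strip izRaw) "Izvor:" "")
  if PySem.Str.isIn " - " source_line then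
    match PySem.Str.splitMax? source_line " - " 1 with
    | some (p0 :: p1 :: _) =>
      (d.insert "izvor" (some (PySem.Str.strip p0))).insert "original_link" (some (PySem.Str.strip p1))
    | _ => d  -- unreachable: ' - ' in source_line guarantees the split has two parts
  else (d.insert "izvor" (some source_line)).insert "original_link" none

-- outer while loop of A (current_article as Option: Python's falsy empty dict, never re-emptied)
def pvLoopA : List String → List (PySem.Dict String (Option String)) → Option (PySem.Dict String (Option String)) → List (PySem.Dict String (Option String))
  | [], arts, cur => arts ++ cur.toList
  | l :: rest, arts, cur =>
    let line := PySem.Str.strip l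
    if PySem.Str.startswith line "NASLOV:" then
      let arts' := arts ++ cur.toList
      let base : PySem.Dict String (Option String) := PySem.Dict.ofList
        [("naslov", some (PySem.Str.strip (PySem.Str.replace line "NASLOV:" ""))),
         ("tekst", some ""), ("ai_enhanced_content", some ""),
         ("izvor", some ""), ("original_link", some ""), ("link", none)]
      let r := pvInnerA rest [] [] false
      let d1 := (base.insert "tekst" (some (PySem.Str.join " " r.1))).insert
                  "ai_enhanced_content" (some (PySem.Str.join " " r.2.1))
      match hrem : r.2.2 with
      | [] => pvLoopA [] arts' (some d1)
      | iz :: rest2 =>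
        let d2 := if PySem.Str.startswith (PySem.Str.strip iz) "Izvor:" then pvSourceA d1 iz else d1
        pvLoopA rest2 arts' (some d2)
    else pvLoopA rest arts cur
termination_by ls _ _ => ls.length
decreasing_by
  · simp
  · have h := pvInnerA_len rest [] [] false
    rw [hrem] at h
    simp at h ⊢
    omega
  · simp

def parse_news_content (content : String) : List (List (String × Option String)) :=
  (pvLoopA ((PySem.Str.split? content "\n").getD []) [] none).map PySem.Dict.items

-- ===== PORT B =====
-- pass-1 fold step: group stripped lines into blocks (header, body lines, optional source line)
def pvStepB (st : List (String × List String × Option String) × Option (String × List String)) (line : String) :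
    List (String × List String × Option String) × Option (String × List String) :=
  match st with
  | (bs, none) => if PySem.Str.startswith line "NASLOV:" then (bs, some (line, [])) else (bs, none)
  | (bs, some (h, body)) =>
    if PySem.Str.startswith line "Izvor:" then (bs ++ [(h, body, some line)], none)
    else (bs, some (h, body ++ [line]))

-- _build_article's body loop: split body lines into tekst / ai via the AI_ENHANCED toggle
def pvClassifyB (st : List String × List String × Bool) (line : String) : List String × List String × Bool :=
  if line = "" then st
  else if PySem.Str.startswith line "AI_ENHANCED:" then
    (st.1, st.2.1 ++ [PySem.Str.strip (PySem.Str.replace line "AI_ENHANCED:" "")], true)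
  else if st.2.2 then (st.1, st.2.1 ++ [line], true)
  else (st.1 ++ [line], st.2.1, st.2.2)

-- _build_article: block → article dict (distinct literal keys, written as its items list)
def pvBuildB (blk : String × List String × Option String) : List (String × Option String) :=
  let r := blk.2.1.foldl pvClassifyB ([], [], false)
  let il : Option String × Option String :=
    match blk.2.2 with
    | none => (some "", some "")
    | some sl =>
      let s := PySem.Str.strip (PySem.Str.replace sl "Izvor:" "")
      if PySem.Str.isIn " - " s then
        match PySem.Str.splitMax? s " - " 1 with
        | some (p0 :: p1 :: _) => (some (PySem.Str.strip p0), some (PySem.Str.strip p1))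
        | _ => (some "", some "")  -- unreachable: ' - ' in s guarantees two parts
      else (some s, none)
  [("naslov", some (PySem.Str.strip (PySem.Str.replace blk.1 "NASLOV:" ""))),
   ("tekst", some (PySem.Str.join " " r.1)),
   ("ai_enhanced_content", some (PySem.Str.join " " r.2.1)),
   ("izvor", il.1), ("original_link", il.2), ("link", none)]

def parse_news_content_alt (content : String) : List (List (String × Option String)) :=
  let st := (((PySem.Str.split? content "\n").getD []).map PySem.Str.strip).foldl pvStepB ([], none)
  let blocks := st.1 ++ (match st.2 with | some (h, body) => [(h, body, none)] | none => [])
  blocks.map pvBuildB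

-- ===== PRECONDITION & SPEC =====
def Spec_parse_news_content (content : String) (out : List (List (String × Option String))) : Prop := out = parse_news_content_alt content
instance (content : String) (out : List (List (String × Option String))) : Decidable (Spec_parse_news_content content out) := by unfold Spec_parse_news_content; infer_instance

-- ===== CLAIM (what is proved, stated in full; the proofs are below) =====
def Claim_equal_parse_news_content : Prop := ∀ (content : String), Dom_parse_news_content content → Spec_parse_news_content content (parse_news_content content)

-- ===== LEMMAS AND PROOFS =====

-- B's articles for a list of (raw) lines, starting in seeking state
def pvB2 (ls : List String) : List (List (String × Option String)) :=
  let st := (ls.map PySem.Str.strip).foldl pvStepB ([], none)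
  (st.1 ++ (match st.2 with | some (h, body) => [(h, body, none)] | none => [])).map pvBuildB

theorem pvStepB_shift : ∀ (ls : List String) (bs : List (String × List String × Option String)) (c : Option (String × List String)),
    ls.foldl pvStepB (bs, c) = (bs ++ (ls.foldl pvStepB ([], c)).1, (ls.foldl pvStepB ([], c)).2) := by
  intro ls
  induction ls with
  | nil => intro bs c; simp
  | cons l rest ih =>
    intro bs c
    match c with
    | none =>
      simp only [List.foldl_cons, pvStepB]
      split <;> exact ih bs _
    | some (h, body) =>
      simp only [List.foldl_cons, pvStepB]
      split
      · rw [ih (bs ++ [(h, body, some l)]) none, ih ([] ++ [(h, body, some l)]) none]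
        simp
      · exact ih bs _

theorem pvStepB_body : ∀ (pre : List String) (bs : List (String × List String × Option String)) (h : String) (body : List String),
    (∀ x ∈ pre, PySem.Str.startswith x "Izvor:" = false) →
    pre.foldl pvStepB (bs, some (h, body)) = (bs, some (h, body ++ pre)) := by
  intro pre
  induction pre with
  | nil => intro bs h body _; simp
  | cons l rest ih =>
    intro bs h body hno
    simp only [List.foldl_cons, pvStepB]
    rw [hno l (by simp)]
    simp only [if_neg Bool.false_ne_true]
    rw [ih bs h (body ++ [l]) (fun x hx => hno x (by simp [hx]))]
    simp

-- equation lemmas for pvInnerA (one per branch of the inner while loop)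
theorem pvInnerA_iz (l : String) (rest t ai : List String) (b : Bool)
    (hiz : PySem.Str.startswith (PySem.Str.strip l) "Izvor:" = true) :
    pvInnerA (l :: rest) t ai b = (t, ai, l :: rest) := by
  simp only [pvInnerA]; rw [hiz]; simp

theorem pvInnerA_blank (l : String) (rest t ai : List String) (b : Bool)
    (hiz : PySem.Str.startswith (PySem.Str.strip l) "Izvor:" = false)
    (hb : PySem.Str.strip l = "") :
    pvInnerA (l :: rest) t ai b = pvInnerA rest t ai b := by
  simp only [pvInnerA]; rw [hiz, hb]; simp

theorem pvInnerA_ai (l : String) (rest t ai : List String) (b : Bool)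
    (hiz : PySem.Str.startswith (PySem.Str.strip l) "Izvor:" = false)
    (hb : PySem.Str.strip l ≠ "")
    (hai : PySem.Str.startswith (PySem.Str.strip l) "AI_ENHANCED:" = true) :
    pvInnerA (l :: rest) t ai b
      = pvInnerA rest t (ai ++ [PySem.Str.strip (PySem.Str.replace (PySem.Str.strip l) "AI_ENHANCED:" "")]) true := by
  simp only [pvInnerA]; rw [hiz, hai]; simp [hb]

theorem pvInnerA_inai (l : String) (rest t ai : List String)
    (hiz : PySem.Str.startswith (PySem.Str.strip l) "Izvor:" = false)
    (hb : PySem.Str.strip l ≠ "")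
    (hai : PySem.Str.startswith (PySem.Str.strip l) "AI_ENHANCED:" = false) :
    pvInnerA (l :: rest) t ai true = pvInnerA rest t (ai ++ [PySem.Str.strip l]) true := by
  simp only [pvInnerA]; rw [hiz, hai]; simp [hb]

theorem pvInnerA_text (l : String) (rest t ai : List String)
    (hiz : PySem.Str.startswith (PySem.Str.strip l) "Izvor:" = false)
    (hb : PySem.Str.strip l ≠ "")
    (hai : PySem.Str.startswith (PySem.Str.strip l) "AI_ENHANCED:" = false) :
    pvInnerA (l :: rest) t ai false = pvInnerA rest (t ++ [PySem.Str.strip l]) ai false := by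
  simp only [pvInnerA]; rw [hiz, hai]; simp [hb]

-- matching equation lemmas for pvClassifyB
theorem pvClassifyB_blank (st : List String × List String × Bool) : pvClassifyB st "" = st := by
  simp [pvClassifyB]

theorem pvClassifyB_ai (st : List String × List String × Bool) (line : String)
    (hb : line ≠ "")
    (hai : PySem.Str.startswith line "AI_ENHANCED:" = true) :
    pvClassifyB st line = (st.1, st.2.1 ++ [PySem.Str.strip (PySem.Str.replace line "AI_ENHANCED:" "")], true) := by
  simp only [pvClassifyB]; rw [hai]; simp [hb]

theorem pvClassifyB_inai (t ai : List String) (line : String)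
    (hb : line ≠ "")
    (hai : PySem.Str.startswith line "AI_ENHANCED:" = false) :
    pvClassifyB (t, ai, true) line = (t, ai ++ [line], true) := by
  simp only [pvClassifyB]; rw [hai]; simp [hb]

theorem pvClassifyB_text (t ai : List String) (line : String)
    (hb : line ≠ "")
    (hai : PySem.Str.startswith line "AI_ENHANCED:" = false) :
    pvClassifyB (t, ai, false) line = (t ++ [line], ai, false) := by
  simp only [pvClassifyB]; rw [hai]; simp [hb]

-- inner-loop spec: pvInnerA walks a non-Izvor prefix, classifying exactly as pvClassifyB does
theorem pvInnerA_spec : ∀ (ls t ai : List String) (b : Bool), ∃ pre b',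
    ls = pre ++ (pvInnerA ls t ai b).2.2 ∧
    List.foldl pvClassifyB (t, ai, b) (pre.map PySem.Str.strip) = ((pvInnerA ls t ai b).1, (pvInnerA ls t ai b).2.1, b') ∧
    (∀ x ∈ pre, PySem.Str.startswith (PySem.Str.strip x) "Izvor:" = false) ∧
    (∀ iz rest2, (pvInnerA ls t ai b).2.2 = iz :: rest2 → PySem.Str.startswith (PySem.Str.strip iz) "Izvor:" = true) := by
  intro ls
  induction ls with
  | nil =>
    intro t ai b
    exact ⟨[], b, by simp [pvInnerA]⟩
  | cons l rest ih =>
    intro t ai b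
    by_cases hiz : PySem.Str.startswith (PySem.Str.strip l) "Izvor:" = true
    · refine ⟨[], b, ?_⟩
      rw [pvInnerA_iz l rest t ai b hiz]
      refine ⟨by simp, by simp, by simp, ?_⟩
      intro iz rest2 h
      cases h; simpa using hiz
    · have hiz' : PySem.Str.startswith (PySem.Str.strip l) "Izvor:" = false := by
        simpa using hiz
      by_cases hblank : PySem.Str.strip l = ""
      · obtain ⟨pre, b', h1, h2, h3, h4⟩ := ih t ai b
        rw [pvInnerA_blank l rest t ai b hiz' hblank] at *
        refine ⟨l :: pre, b', by simpa using h1, ?_, ?_, h4⟩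
        · simpa [hblank, pvClassifyB_blank] using h2
        · intro x hx
          rcases List.mem_cons.mp hx with h | h
          · subst h; exact hiz'
          · exact h3 x h
      · by_cases hai : PySem.Str.startswith (PySem.Str.strip l) "AI_ENHANCED:" = true
        · obtain ⟨pre, b', h1, h2, h3, h4⟩ :=
            ih t (ai ++ [PySem.Str.strip (PySem.Str.replace (PySem.Str.strip l) "AI_ENHANCED:" "")]) true
          rw [pvInnerA_ai l rest t ai b hiz' hblank hai] at *
          refine ⟨l :: pre, b', by simpa using h1, ?_, ?_, h4⟩
          · simpa [pvClassifyB_ai (t, ai, b) (PySem.Str.strip l) hblank hai] using h2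
          · intro x hx
            rcases List.mem_cons.mp hx with h | h
            · subst h; exact hiz'
            · exact h3 x h
        · have hai' : PySem.Str.startswith (PySem.Str.strip l) "AI_ENHANCED:" = false := by
            simpa using hai
          cases b with
          | true =>
            obtain ⟨pre, b', h1, h2, h3, h4⟩ := ih t (ai ++ [PySem.Str.strip l]) true
            rw [pvInnerA_inai l rest t ai hiz' hblank hai'] at *
            refine ⟨l :: pre, b', by simpa using h1, ?_, ?_, h4⟩
            · simpa [pvClassifyB_inai t ai (PySem.Str.strip l) hblank hai'] using h2
            · intro x hx
              rcases List.mem_cons.mp hx with h | h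
              · subst h; exact hiz'
              · exact h3 x h
          | false =>
            obtain ⟨pre, b', h1, h2, h3, h4⟩ := ih (t ++ [PySem.Str.strip l]) ai false
            rw [pvInnerA_text l rest t ai hiz' hblank hai'] at *
            refine ⟨l :: pre, b', by simpa using h1, ?_, ?_, h4⟩
            · simpa [pvClassifyB_text t ai (PySem.Str.strip l) hblank hai'] using h2
            · intro x hx
              rcases List.mem_cons.mp hx with h | h
              · subst h; exact hiz'
              · exact h3 x h

-- items of A's article dict after the tekst / ai_enhanced_content updates
theorem pvItemsA1 (n t a : Option String) :
    (((PySem.Dict.ofList [("naslov", n), ("tekst", some ""), ("ai_enhanced_content", some ""), ("izvor", some ""), ("original_link", some ""), ("link", (none : Option String))]).insert "tekst" t).insert "ai_enhanced_content" a).items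
      = [("naslov", n), ("tekst", t), ("ai_enhanced_content", a), ("izvor", some ""), ("original_link", some ""), ("link", none)] := by
  simp [PySem.Dict.ofList, PySem.Dict.update, PySem.Dict.empty, PySem.Dict.insert, PySem.Dict.contains, List.foldl, String.reduceEq]

-- items after the additional izvor / original_link updates
theorem pvItemsA2 (n t a i o : Option String) :
    (((((PySem.Dict.ofList [("naslov", n), ("tekst", some ""), ("ai_enhanced_content", some ""), ("izvor", some ""), ("original_link", some ""), ("link", (none : Option String))]).insert "tekst" t).insert "ai_enhanced_content" a).insert "izvor" i).insert "original_link" o).items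
      = [("naslov", n), ("tekst", t), ("ai_enhanced_content", a), ("izvor", i), ("original_link", o), ("link", none)] := by
  simp [PySem.Dict.ofList, PySem.Dict.update, PySem.Dict.empty, PySem.Dict.insert, PySem.Dict.contains, List.foldl, String.reduceEq]

-- A's freshly built article dict (after the tekst / ai updates), as used in the unfolding lemmas
def pvD1 (l : String) (rest : List String) : PySem.Dict String (Option String) :=
  ((PySem.Dict.ofList
      [("naslov", some (PySem.Str.strip (PySem.Str.replace (PySem.Str.strip l) "NASLOV:" ""))),
       ("tekst", some ""), ("ai_enhanced_content", some ""),
       ("izvor", some ""), ("original_link", some ""), ("link", none)]).insert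
     "tekst" (some (PySem.Str.join " " (pvInnerA rest [] [] false).1))).insert
    "ai_enhanced_content" (some (PySem.Str.join " " (pvInnerA rest [] [] false).2.1))

theorem pvStepB_none (bs : List (String × List String × Option String)) (line : String) :
    pvStepB (bs, none) line = if PySem.Str.startswith line "NASLOV:" then (bs, some (line, [])) else (bs, none) := rfl

theorem pvStepB_some (bs : List (String × List String × Option String)) (h : String) (body : List String) (line : String) :
    pvStepB (bs, some (h, body)) line
      = if PySem.Str.startswith line "Izvor:" then (bs ++ [(h, body, some line)], none) else (bs, some (h, body ++ [line])) := rfl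

theorem pvLoopA_nil (arts : List (PySem.Dict String (Option String))) (cur : Option (PySem.Dict String (Option String))) :
    pvLoopA [] arts cur = arts ++ cur.toList := by
  simp [pvLoopA]

theorem pvLoopA_cons_no (l : String) (rest : List String) (arts : List (PySem.Dict String (Option String))) (cur : Option (PySem.Dict String (Option String)))
    (hn : PySem.Str.startswith (PySem.Str.strip l) "NASLOV:" = false) :
    pvLoopA (l :: rest) arts cur = pvLoopA rest arts cur := by
  rw [pvLoopA]
  rw [hn]
  simp

theorem pvLoopA_yes_nil (l : String) (rest : List String) (arts : List (PySem.Dict String (Option String))) (cur : Option (PySem.Dict String (Option String)))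
    (hn : PySem.Str.startswith (PySem.Str.strip l) "NASLOV:" = true)
    (hrem : (pvInnerA rest [] [] false).2.2 = []) :
    pvLoopA (l :: rest) arts cur = (arts ++ cur.toList) ++ [pvD1 l rest] := by
  rw [pvLoopA]
  rw [hn]
  simp only [if_true]
  rw [hrem]
  simp [pvLoopA, pvD1]

theorem pvLoopA_yes_iz (l : String) (rest : List String) (arts : List (PySem.Dict String (Option String))) (cur : Option (PySem.Dict String (Option String)))
    (iz : String) (rest2 : List String)
    (hn : PySem.Str.startswith (PySem.Str.strip l) "NASLOV:" = true)
    (hrem : (pvInnerA rest [] [] false).2.2 = iz :: rest2) :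
    pvLoopA (l :: rest) arts cur
      = pvLoopA rest2 (arts ++ cur.toList)
          (some (if PySem.Str.startswith (PySem.Str.strip iz) "Izvor:" then pvSourceA (pvD1 l rest) iz else pvD1 l rest)) := by
  rw [pvLoopA]
  rw [hn]
  simp only [if_true]
  rw [hrem]
  simp [pvD1]

-- items of A's dict after pvSourceA, expressed through B's izvor/original_link computation
theorem pvItemsSource (nv t a : Option String) (iz : String) :
    (pvSourceA (((PySem.Dict.ofList [("naslov", nv), ("tekst", some ""), ("ai_enhanced_content", some ""), ("izvor", some ""), ("original_link", some ""), ("link", (none : Option String))]).insert "tekst" t).insert "ai_enhanced_content" a) iz).items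
      = (let s := PySem.Str.strip (PySem.Str.replace (PySem.Str.strip iz) "Izvor:" "")
         let X : Option String × Option String :=
           if PySem.Str.isIn " - " s then
             match PySem.Str.splitMax? s " - " 1 with
             | some (p0 :: p1 :: _) => (some (PySem.Str.strip p0), some (PySem.Str.strip p1))
             | _ => (some "", some "")
           else (some s, none)
         [("naslov", nv), ("tekst", t), ("ai_enhanced_content", a), ("izvor", X.1), ("original_link", X.2), ("link", none)]) := by
  unfold pvSourceA
  by_cases hin : PySem.Str.isIn " - " (PySem.Str.strip (PySem.Str.replace (PySem.Str.strip iz) "Izvor:" "")) = true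
  · rw [if_pos hin]
    simp only [hin, if_true]
    rcases hsp : PySem.Str.splitMax? (PySem.Str.strip (PySem.Str.replace (PySem.Str.strip iz) "Izvor:" "")) " - " 1 with _ | ps
    · exact pvItemsA1 nv t a
    · rcases ps with _ | ⟨p0, ps⟩
      · exact pvItemsA1 nv t a
      · rcases ps with _ | ⟨p1, tl⟩
        · exact pvItemsA1 nv t a
        · exact pvItemsA2 nv t a _ _
  · have hin' : PySem.Str.isIn " - " (PySem.Str.strip (PySem.Str.replace (PySem.Str.strip iz) "Izvor:" "")) = false := by simpa using hin
    simp only [hin', Bool.false_eq_true, if_false]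
    exact pvItemsA2 nv t a _ _

-- main correspondence, by strong induction on the number of remaining lines
theorem pvMain : ∀ (n : ℕ) (ls : List String), ls.length ≤ n →
    ∀ (arts : List (PySem.Dict String (Option String))) (cur : Option (PySem.Dict String (Option String))),
    (pvLoopA ls arts cur).map PySem.Dict.items
      = arts.map PySem.Dict.items ++ cur.toList.map PySem.Dict.items ++ pvB2 ls := by
  intro n
  induction n with
  | zero =>
    intro ls hls arts cur
    have h0 : ls = [] := List.eq_nil_of_length_eq_zero (by omega)
    subst h0
    simp [pvLoopA_nil, pvB2]
  | succ n ihn =>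
    intro ls hls arts cur
    cases ls with
    | nil => simp [pvLoopA_nil, pvB2]
    | cons l rest =>
      by_cases hn : PySem.Str.startswith (PySem.Str.strip l) "NASLOV:" = true
      · obtain ⟨pre, b', h1, h2, h3, h4⟩ := pvInnerA_spec rest [] [] false
        have h3' : ∀ x ∈ pre.map PySem.Str.strip, PySem.Str.startswith x "Izvor:" = false := by
          intro x hx
          rcases List.mem_map.mp hx with ⟨y, hy, rfl⟩
          exact h3 y hy
        cases hrem : (pvInnerA rest [] [] false).2.2 with
        | nil =>
          rw [hrem] at h1
          rw [pvLoopA_yes_nil l rest arts cur hn hrem]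
          have hb2 : pvB2 (l :: rest) = [pvBuildB (PySem.Str.strip l, pre.map PySem.Str.strip, none)] := by
            unfold pvB2
            simp only [List.map_cons, List.foldl_cons, pvStepB_none, hn, if_true]
            rw [h1, List.append_nil]
            rw [pvStepB_body (pre.map PySem.Str.strip) [] (PySem.Str.strip l) [] h3']
            simp
          rw [hb2]
          have hd1 : (pvD1 l rest).items = pvBuildB (PySem.Str.strip l, pre.map PySem.Str.strip, none) := by
            unfold pvD1
            rw [pvItemsA1]
            simp only [pvBuildB, h2]
          simp [hd1]
        | cons iz rest2 =>
          have hiz : PySem.Str.startswith (PySem.Str.strip iz) "Izvor:" = true := h4 iz rest2 hrem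
          rw [pvLoopA_yes_iz l rest arts cur iz rest2 hn hrem, if_pos hiz]
          rw [hrem] at h1
          have hlen : rest2.length ≤ n := by
            have := congrArg List.length h1
            simp at this hls
            omega
          rw [ihn rest2 hlen (arts ++ cur.toList) (some (pvSourceA (pvD1 l rest) iz))]
          have hb2 : pvB2 (l :: rest)
              = pvBuildB (PySem.Str.strip l, pre.map PySem.Str.strip, some (PySem.Str.strip iz)) :: pvB2 rest2 := by
            unfold pvB2
            simp only [List.map_cons, List.foldl_cons, pvStepB_none, hn, if_true]
            rw [h1]
            simp only [List.map_append, List.map_cons, List.foldl_append, List.foldl_cons]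
            rw [pvStepB_body (pre.map PySem.Str.strip) [] (PySem.Str.strip l) [] h3']
            rw [pvStepB_some [] (PySem.Str.strip l) ([] ++ pre.map PySem.Str.strip) (PySem.Str.strip iz)]
            rw [if_pos hiz]
            rw [pvStepB_shift (rest2.map PySem.Str.strip) ([] ++ [(PySem.Str.strip l, [] ++ pre.map PySem.Str.strip, some (PySem.Str.strip iz))]) none]
            simp
          rw [hb2]
          have hd2 : (pvSourceA (pvD1 l rest) iz).items
              = pvBuildB (PySem.Str.strip l, pre.map PySem.Str.strip, some (PySem.Str.strip iz)) := by
            unfold pvD1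
            rw [pvItemsSource]
            simp only [pvBuildB, h2]
          simp [hd2]
      · have hn' : PySem.Str.startswith (PySem.Str.strip l) "NASLOV:" = false := by simpa using hn
        rw [pvLoopA_cons_no l rest arts cur hn']
        rw [ihn rest (by simpa using Nat.le_of_succ_le_succ (by simpa using hls)) arts cur]
        have hb2 : pvB2 (l :: rest) = pvB2 rest := by
          unfold pvB2
          simp only [List.map_cons, List.foldl_cons, pvStepB_none, hn']
          simp
        rw [hb2]

-- ===== VERDICT (by name: the statement is the Claim_ definition above) =====
theorem parse_news_content_spec : Claim_equal_parse_news_content := by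
  intro content _
  unfold Spec_parse_news_content parse_news_content parse_news_content_alt
  rw [pvMain ((PySem.Str.split? content "\n").getD []).length _ le_rfl [] none]
  simp [pvB2]
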